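-- pv_equiv track=rewrite | github.com/rkapur123/assorted_python_projects | project_3/image_shop.py | negate_red
-- ===== SOURCE A (Python) =====
-- def negate_red(rowArray, maxColorValue): #pass max RGB Value
--     i = 0
--     newRowArray = []
--     for item in rowArray:#loop through the row Array
--         if((i)%3 == 0 or (i) == 0):
--             item = ((int(item)-int(maxColorValue)) * -1) # change R color value
--             newRowArray.append(item) # append to new array
--         else:
--             newRowArray.append(item)
--         i = i +1
--
--     return newRowArray # return array
-- ===== SOURCE B (Python) =====
-- def negate_red(rowArray, maxColorValue):
--     result = list(rowArray)
--     for i in range(0, len(rowArray), 3):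
--         result[i] = (int(result[i]) - int(maxColorValue)) * -1
--     return result
-- ===== Notes on version B (the rewrite author's own statement) =====
-- stated objective: alternative
-- what changed: Instead of rebuilding the list element by element with a per-counter modulo branch, B copies the list once and then overwrites only the red positions with a strided range(0, n, 3) loop.
import Mathlib
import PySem

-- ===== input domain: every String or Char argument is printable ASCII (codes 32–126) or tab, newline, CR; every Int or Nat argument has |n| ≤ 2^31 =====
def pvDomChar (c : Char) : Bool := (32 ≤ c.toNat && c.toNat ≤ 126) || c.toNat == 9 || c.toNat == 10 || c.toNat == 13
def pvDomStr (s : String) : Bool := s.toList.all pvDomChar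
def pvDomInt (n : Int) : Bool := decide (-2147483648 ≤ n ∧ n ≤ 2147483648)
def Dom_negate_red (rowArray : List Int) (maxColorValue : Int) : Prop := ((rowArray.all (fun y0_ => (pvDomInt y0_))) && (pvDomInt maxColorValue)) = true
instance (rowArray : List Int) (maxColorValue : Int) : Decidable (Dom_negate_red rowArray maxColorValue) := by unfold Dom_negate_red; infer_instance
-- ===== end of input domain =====

-- B rewrites A's element-by-element rebuild (counter + modulo branch) as a bulk copy plus a
-- strided range(0, n, 3) overwrite of the red positions only (alternative decomposition, same cost).

-- ===== PORT A =====
-- state = (i, newRowArray); per element: negate if i % 3 == 0 or i == 0, else keep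
def negate_red (rowArray : List Int) (maxColorValue : Int) : List Int :=
  (rowArray.foldl
    (fun (st : Int × List Int) item =>
      if PySem.Int.mod st.1 3 = 0 ∨ st.1 = 0 then
        (st.1 + 1, st.2 ++ [(item - maxColorValue) * -1])
      else
        (st.1 + 1, st.2 ++ [item]))
    (0, [])).2

-- ===== PORT B =====
-- result = list(rowArray); for i in range(0, len(rowArray), 3): result[i] = (result[i] - maxColorValue) * -1
def negate_red_alt (rowArray : List Int) (maxColorValue : Int) : List Int :=
  (PySem.List.pyRange 0 (rowArray.length : Int) 3).foldl
    (fun result i => result.set i.toNat ((result[i.toNat]! - maxColorValue) * -1))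
    rowArray

-- ===== PRECONDITION & SPEC =====
def Spec_negate_red (rowArray : List Int) (maxColorValue : Int) (out : List Int) : Prop := out = negate_red_alt rowArray maxColorValue
instance (rowArray : List Int) (maxColorValue : Int) (out : List Int) : Decidable (Spec_negate_red rowArray maxColorValue out) := by unfold Spec_negate_red; infer_instance

-- ===== CLAIM (what is proved, stated in full; the proofs are below) =====
def Claim_equal_negate_red : Prop := ∀ (rowArray : List Int) (maxColorValue : Int), Dom_negate_red rowArray maxColorValue → Spec_negate_red rowArray maxColorValue (negate_red rowArray maxColorValue)

-- ===== LEMMAS AND PROOFS =====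

-- common characterisation of both results
def nrSpec (m : Int) (xs : List Int) : List Int :=
  xs.mapIdx (fun j x => if j % 3 = 0 then (x - m) * -1 else x)

lemma negate_red_fold (m : Int) :
    ∀ (xs : List Int) (k : Nat) (acc : List Int),
      (xs.foldl
        (fun (st : Int × List Int) item =>
          if PySem.Int.mod st.1 3 = 0 ∨ st.1 = 0 then
            (st.1 + 1, st.2 ++ [(item - m) * -1])
          else
            (st.1 + 1, st.2 ++ [item]))
        ((k : Int), acc)).2
      = acc ++ xs.mapIdx (fun j x => if (k + j) % 3 = 0 then (x - m) * -1 else x) := by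
  intro xs
  induction xs with
  | nil => intro k acc; simp
  | cons x xs ih =>
    intro k acc
    have hcond : (PySem.Int.mod (k : Int) 3 = 0 ∨ (k : Int) = 0) ↔ k % 3 = 0 := by
      rw [PySem.Int.mod_eq_emod_of_pos (by norm_num)]
      omega
    have hk1 : ((k : Int) + 1) = ((k + 1 : Nat) : Int) := by push_cast; ring
    have harg : xs.mapIdx (fun i a => if (k + (i + 1)) % 3 = 0 then (a - m) * -1 else a)
        = xs.mapIdx (fun i a => if (k + 1 + i) % 3 = 0 then (a - m) * -1 else a) := by
      refine List.ext_getElem (by simp) ?_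
      intro j h1 h2
      simp only [List.getElem_mapIdx]
      have h3 : k + (j + 1) = k + 1 + j := by omega
      rw [h3]
    by_cases h : k % 3 = 0
    · rw [List.foldl_cons, if_pos (hcond.mpr h), hk1, ih, List.mapIdx_cons]
      simp only [Nat.add_zero, if_pos h]
      rw [harg]
      simp
    · rw [List.foldl_cons, if_neg (by rw [hcond]; exact h), hk1, ih, List.mapIdx_cons]
      simp only [Nat.add_zero, if_neg h]
      rw [harg]
      simp

lemma negate_red_eq_nrSpec (xs : List Int) (m : Int) :
    negate_red xs m = nrSpec m xs := by
  have h := negate_red_fold m xs 0 []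
  simpa [negate_red, nrSpec] using h

-- B-side: folding the strided set over a nodup list of in-range nonneg indices
lemma setFold_len (m : Int) :
    ∀ (l : List Int) (res : List Int),
      (l.foldl (fun result i => result.set i.toNat ((result[i.toNat]! - m) * -1)) res).length
        = res.length := by
  intro l
  induction l with
  | nil => intro res; rfl
  | cons i l ih => intro res; rw [List.foldl_cons, ih, List.length_set]

lemma setFold_get (m : Int) :
    ∀ (l : List Int) (res : List Int), l.Nodup →
      (∀ i ∈ l, 0 ≤ i ∧ i < (res.length : Int)) →
      ∀ (j : Nat) (hj : j < res.length),
        (l.foldl (fun result i => result.set i.toNat ((result[i.toNat]! - m) * -1)) res)[j]?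
        = some (if ((j : Int) ∈ l) then (res[j]'hj - m) * -1 else res[j]'hj) := by
  intro l
  induction l with
  | nil => intro res _ _ j hj; simp [List.getElem?_eq_getElem hj]
  | cons i l ih =>
    intro res hnd hb j hj
    obtain ⟨hi0, hilt⟩ := hb i List.mem_cons_self
    have hit : i.toNat < res.length := by omega
    have hgetbang : res[i.toNat]! = res[i.toNat]'hit := by
      rw [List.getElem!_eq_getElem?_getD, List.getElem?_eq_getElem hit]; rfl
    rw [List.foldl_cons]
    set res' := res.set i.toNat ((res[i.toNat]! - m) * -1) with hres'
    have hlen : res'.length = res.length := by rw [hres', List.length_set]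
    have hj' : j < res'.length := by omega
    have hb' : ∀ a ∈ l, 0 ≤ a ∧ a < (res'.length : Int) := by
      intro a ha
      have := hb a (List.mem_cons_of_mem _ ha)
      omega
    rw [ih res' (List.nodup_cons.mp hnd).2 hb' j hj']
    have hset : res'[j]'hj' = if i.toNat = j then (res[i.toNat]'hit - m) * -1 else res[j]'hj := by
      simp only [hres', List.getElem_set, hgetbang]
    by_cases hjl : (j : Int) ∈ l
    · have hne : i.toNat ≠ j := by
        intro he
        exact (List.nodup_cons.mp hnd).1 (by rw [show i = ((j : Nat) : Int) by omega]; exact hjl)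
      rw [if_pos hjl, hset, if_neg hne, if_pos (List.mem_cons_of_mem _ hjl)]
    · by_cases he : i.toNat = j
      · subst he
        have hmem : ((i.toNat : Nat) : Int) ∈ i :: l := by
          rw [List.mem_cons]; left; omega
        rw [if_neg hjl, hset, if_pos rfl, if_pos hmem]
      · have hmem : ((j : Nat) : Int) ∉ i :: l := by
          simp only [List.mem_cons, not_or]; exact ⟨by omega, hjl⟩
        rw [if_neg hjl, hset, if_neg he, if_neg hmem]

lemma negate_red_alt_eq_nrSpec (xs : List Int) (m : Int) :
    negate_red_alt xs m = nrSpec m xs := by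
  unfold negate_red_alt nrSpec
  have hnd : (PySem.List.pyRange 0 (xs.length : Int) 3).Nodup := by
    rw [PySem.List.pyRange_of_pos 0 (xs.length : Int) (by norm_num)]
    refine List.Nodup.map ?_ List.nodup_range
    intro a b hab
    simp only at hab
    omega
  have hb : ∀ i ∈ PySem.List.pyRange 0 (xs.length : Int) 3, 0 ≤ i ∧ i < (xs.length : Int) := by
    intro i hi
    have := (PySem.List.mem_pyRange_iff_of_pos (by norm_num) i).mp hi
    exact ⟨this.1, this.2.1⟩
  apply List.ext_getElem?
  intro j
  by_cases hj : j < xs.length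
  · rw [setFold_get m _ xs hnd hb j hj,
      List.getElem?_eq_getElem (by simpa using hj), List.getElem_mapIdx]
    have hmem : (((j : Nat) : Int) ∈ PySem.List.pyRange 0 (xs.length : Int) 3) ↔ j % 3 = 0 := by
      rw [PySem.List.mem_pyRange_iff_of_pos (by norm_num)]
      constructor
      · rintro ⟨_, _, hd⟩; omega
      · intro h; exact ⟨by omega, by omega, by omega⟩
    by_cases h : j % 3 = 0
    · rw [if_pos (hmem.mpr h), if_pos h]
    · rw [if_neg (fun hc => h (hmem.mp hc)), if_neg h]
  · rw [List.getElem?_eq_none, List.getElem?_eq_none]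
    · simpa using Nat.le_of_not_lt hj
    · rw [setFold_len]; exact Nat.le_of_not_lt hj

-- ===== VERDICT (by name: the statement is the Claim_ definition above) =====
theorem negate_red_spec : Claim_equal_negate_red := by
  intro xs m _
  unfold Spec_negate_red
  rw [negate_red_eq_nrSpec, negate_red_alt_eq_nrSpec]
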